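-- pv_equiv track=rewrite | github.com/oleksandr-medviediev/campus_2018_python | Viktor_Miroshnychenko/3/braces.py | check_braces
-- ===== SOURCE A (Python) =====
-- def check_braces(string):
--     """
--     :param string: string to check
--     :type string: str
--
--     :return: True if all braces closed and False otherwise
--     :rtype: bool
--     """
--
--     ret_val = True
--     if string.count("(") != string.count(")"):
--         ret_val = False
--     elif string.count("[") != string.count("]"):
--         ret_val = False
--     elif string.count("{") != string.count("}"):
--         ret_val = False
--     else:
--         braces1 = 0
--         braces2 = 0
--         braces3 = 0
--         for char in string:
--             if char == "[":
--                 braces1 += 1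
--             elif char == "]":
--                 braces1 -= 1
--             elif char == "(":
--                 braces2 += 1
--             elif char == ")":
--                 braces2 -= 1
--             elif char == "{":
--                 braces3 += 1
--             elif char == "}":
--                 braces3 -= 1
--
--             if braces1 < 0 or braces2 < 0 or braces3 < 0:
--                 ret_val = False
--                 break
--
--     return ret_val
-- ===== SOURCE B (Python) =====
-- def check_braces(string):
--     """
--     :param string: string to check
--     :type string: str
--
--     :return: True if all braces closed and False otherwise
--     :rtype: bool
--     """
--
--     for op, cl in (("(", ")"), ("[", "]"), ("{", "}")):
--         opens = [i for i, ch in enumerate(string) if ch == op]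
--         closes = [i for i, ch in enumerate(string) if ch == cl]
--         if len(opens) != len(closes):
--             return False
--         if any(o > c for o, c in zip(opens, closes)):
--             return False
--     return True
-- ===== Notes on version B (the rewrite author's own statement) =====
-- stated objective: alternative
-- what changed: Replaces A's three str.count balance checks plus a three-counter early-break scan by a per-type positional algorithm: for each brace pair, build the index lists of openers and closers and accept iff they have equal length and each k-th opener precedes the k-th closer.
import Mathlib
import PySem

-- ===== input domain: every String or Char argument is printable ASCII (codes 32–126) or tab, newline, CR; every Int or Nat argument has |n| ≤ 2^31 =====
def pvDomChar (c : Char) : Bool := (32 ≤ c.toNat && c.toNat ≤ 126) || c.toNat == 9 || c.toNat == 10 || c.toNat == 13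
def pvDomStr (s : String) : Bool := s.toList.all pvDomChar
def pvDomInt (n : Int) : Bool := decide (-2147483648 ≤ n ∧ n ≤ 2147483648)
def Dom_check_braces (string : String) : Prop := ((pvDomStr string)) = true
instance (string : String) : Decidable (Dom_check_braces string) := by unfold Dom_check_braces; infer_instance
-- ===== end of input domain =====

-- B replaces A's count checks + three-counter scan by a per-type algorithm: collect the index
-- lists of opening and closing braces and accept iff they have equal length and each k-th opener
-- precedes the k-th closer (alternative algorithm, same cost; per-type only, so "([)]" is accepted like A).


-- ===== PORT A =====
-- A's for-loop with the mid-loop `break`: per-char update in A's elif order, then the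
-- three-way negativity check that breaks with ret_val = False.
def checkLoopA : List Char → Int → Int → Int → Bool
  | [], _, _, _ => true
  | ch :: rest, braces1, braces2, braces3 =>
    let st :=
      if ch = '[' then (braces1 + 1, braces2, braces3)
      else if ch = ']' then (braces1 - 1, braces2, braces3)
      else if ch = '(' then (braces1, braces2 + 1, braces3)
      else if ch = ')' then (braces1, braces2 - 1, braces3)
      else if ch = '{' then (braces1, braces2, braces3 + 1)
      else if ch = '}' then (braces1, braces2, braces3 - 1)
      else (braces1, braces2, braces3)
    if st.1 < 0 ∨ st.2.1 < 0 ∨ st.2.2 < 0 then false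
    else checkLoopA rest st.1 st.2.1 st.2.2

def check_braces (string : String) : Bool :=
  if PySem.Str.count string "(" ≠ PySem.Str.count string ")" then false
  else if PySem.Str.count string "[" ≠ PySem.Str.count string "]" then false
  else if PySem.Str.count string "{" ≠ PySem.Str.count string "}" then false
  else checkLoopA string.toList 0 0 0

-- ===== PORT B =====
-- B: for each brace pair, build the index lists of openers and closers (comprehensions over
-- enumerate) and fail if the lengths differ or some zipped pair has the opener after the closer.
def bracePairs : List (Char × Char) := [('(', ')'), ('[', ']'), ('{', '}')]

def check_braces_alt (string : String) : Bool :=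
  bracePairs.all (fun p =>
    let opens := (PySem.List.enumerate string.toList 0).filterMap
        (fun ic => if ic.2 = p.1 then some ic.1 else none)
    let closes := (PySem.List.enumerate string.toList 0).filterMap
        (fun ic => if ic.2 = p.2 then some ic.1 else none)
    decide (opens.length = closes.length) &&
      !((opens.zip closes).any (fun oc => decide (oc.1 > oc.2))))

-- ===== PRECONDITION & SPEC =====
def Spec_check_braces (string : String) (out : Bool) : Prop := out = check_braces_alt string
instance (string : String) (out : Bool) : Decidable (Spec_check_braces string out) := by unfold Spec_check_braces; infer_instance

-- ===== CLAIM (what is proved, stated in full; the proofs are below) =====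
def Claim_equal_check_braces : Prop := ∀ (string : String), Dom_check_braces string → Spec_check_braces string (check_braces string)

-- ===== LEMMAS AND PROOFS =====

-- PySem.Chars.count on a one-character needle is List.count.
theorem countGo_singleton (c : Char) : ∀ (fuel : Nat) (l : List Char) (acc : Nat), l.length ≤ fuel →
    PySem.Chars.count.go [c] fuel l acc = acc + l.count c := by
  intro fuel
  induction fuel with
  | zero =>
    intro l acc h
    cases l with
    | nil => simp [PySem.Chars.count.go]
    | cons x t => simp at h
  | succ n ih =>
    intro l acc h
    cases l with
    | nil => simp [PySem.Chars.count.go]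
    | cons x t =>
      simp only [PySem.Chars.count.go, List.isPrefixOf, List.count_cons]
      by_cases hc : c = x
      · subst hc; simp [ih t (acc + 1) (by simpa using h)]; omega
      · simp [hc, Ne.symm hc, ih t acc (by simpa using h)]

theorem count_singleton (l : List Char) (c : Char) : PySem.Chars.count l [c] = l.count c := by
  simp [PySem.Chars.count, countGo_singleton c l.length l 0 le_rfl]

-- index positions of a character, starting index i
def pos (ch : Char) : Int → List Char → List Int
  | _, [] => []
  | i, c :: l => if c = ch then i :: pos ch (i + 1) l else pos ch (i + 1) l

theorem enumFilter (ch : Char) : ∀ (l : List Char) (i : Int),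
    (PySem.List.enumerate l i).filterMap (fun ic => if ic.2 = ch then some ic.1 else none)
      = pos ch i l := by
  intro l
  induction l with
  | nil => intro i; simp [pos, PySem.List.enumerate_nil]
  | cons c t ih =>
    intro i
    simp only [PySem.List.enumerate_cons, List.filterMap_cons, pos]
    by_cases hc : c = ch <;> simp [hc, ih]

theorem pos_ge (ch : Char) : ∀ (l : List Char) (i x : Int), x ∈ pos ch i l → i ≤ x := by
  intro l
  induction l with
  | nil => intro i x h; simp [pos] at h
  | cons c t ih =>
    intro i x h
    simp only [pos] at h
    by_cases hc : c = ch
    · simp [hc] at h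
      rcases h with h | h
      · omega
      · have := ih (i + 1) x h; omega
    · simp [hc] at h
      have := ih (i + 1) x h; omega

theorem pos_length (ch : Char) : ∀ (l : List Char) (i : Int), (pos ch i l).length = l.count ch := by
  intro l
  induction l with
  | nil => intro i; simp [pos]
  | cons c t ih =>
    intro i
    by_cases hc : c = ch <;> simp [pos, hc, ih]

theorem pos_disjoint (op cl : Char) (hne : op ≠ cl) : ∀ (l : List Char) (i x : Int),
    x ∈ pos op i l → x ∉ pos cl i l := by
  intro l
  induction l with
  | nil => intro i x h; simp [pos] at h
  | cons c t ih =>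
    intro i x h1 h2
    simp only [pos] at h1 h2
    by_cases hop : c = op
    · have hcl : ¬ c = cl := by rw [hop]; exact hne
      rw [if_pos hop] at h1
      rw [if_neg hcl] at h2
      simp only [List.mem_cons] at h1
      rcases h1 with h1 | h1
      · have := pos_ge cl t (i + 1) x h2; omega
      · exact ih (i + 1) x h1 h2
    · rw [if_neg hop] at h1
      by_cases hcl : c = cl
      · rw [if_pos hcl] at h2
        simp only [List.mem_cons] at h2
        rcases h2 with h2 | h2
        · have := pos_ge op t (i + 1) x h1; omega
        · exact ih (i + 1) x h1 h2
      · rw [if_neg hcl] at h2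
        exact ih (i + 1) x h1 h2

-- single-type version of A's scan: one counter, early false on a negative
def loop1 (op cl : Char) : List Char → Int → Bool
  | [], _ => true
  | c :: rest, k =>
    if c = op then loop1 op cl rest (k + 1)
    else if c = cl then (if k - 1 < 0 then false else loop1 op cl rest (k - 1))
    else loop1 op cl rest k

-- A's combined three-counter loop is the conjunction of three single-type scans
theorem splitA : ∀ (l : List Char) (b1 b2 b3 : Int), 0 ≤ b1 → 0 ≤ b2 → 0 ≤ b3 →
    checkLoopA l b1 b2 b3 =
      (loop1 '[' ']' l b1 && loop1 '(' ')' l b2 && loop1 '{' '}' l b3) := by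
  intro l
  induction l with
  | nil => intro b1 b2 b3 _ _ _; simp [checkLoopA, loop1]
  | cons c t ih =>
    intro b1 b2 b3 h1 h2 h3
    by_cases e1 : c = '['
    · subst e1
      simp only [checkLoopA, loop1]
      simp [show ¬(b1 + 1 < 0 ∨ b2 < 0 ∨ b3 < 0) by omega,
            ih (b1 + 1) b2 b3 (by omega) h2 h3]
    · by_cases e2 : c = ']'
      · subst e2
        by_cases hz : b1 - 1 < 0
        · simp [checkLoopA, loop1, hz]
        · simp only [checkLoopA, loop1]
          simp only [show ((']':Char) = '[') = False by simp, if_false, if_true]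
          rw [if_neg (show ¬(b1 - 1 < 0 ∨ b2 < 0 ∨ b3 < 0) by omega),
              if_neg hz, ih (b1 - 1) b2 b3 (by omega) h2 h3]
          simp
      · by_cases e3 : c = '('
        · subst e3
          simp only [checkLoopA, loop1]
          simp [show ¬(b1 < 0 ∨ b2 + 1 < 0 ∨ b3 < 0) by omega,
                ih b1 (b2 + 1) b3 h1 (by omega) h3]
        · by_cases e4 : c = ')'
          · subst e4
            by_cases hz : b2 - 1 < 0
            · simp [checkLoopA, loop1, hz]
            · simp only [checkLoopA, loop1]
              simp only [show ((')':Char) = '[') = False by simp, show ((')':Char) = ']') = False by simp,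
                         show ((')':Char) = '(') = False by simp, if_false, if_true]
              rw [if_neg (show ¬(b1 < 0 ∨ b2 - 1 < 0 ∨ b3 < 0) by omega),
                  if_neg hz, ih b1 (b2 - 1) b3 h1 (by omega) h3]
              simp
          · by_cases e5 : c = '{'
            · subst e5
              simp only [checkLoopA, loop1]
              simp [show ¬(b1 < 0 ∨ b2 < 0 ∨ b3 + 1 < 0) by omega,
                    ih b1 b2 (b3 + 1) h1 h2 (by omega)]
            · by_cases e6 : c = '}'
              · subst e6
                by_cases hz : b3 - 1 < 0
                · simp [checkLoopA, loop1, hz]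
                · simp only [checkLoopA, loop1]
                  simp only [show (('}':Char) = '[') = False by simp, show (('}':Char) = ']') = False by simp,
                             show (('}':Char) = '(') = False by simp, show (('}':Char) = ')') = False by simp,
                             show (('}':Char) = '{') = False by simp, if_false, if_true]
                  rw [if_neg (show ¬(b1 < 0 ∨ b2 < 0 ∨ b3 - 1 < 0) by omega),
                      if_neg hz, ih b1 b2 (b3 - 1) h1 h2 (by omega)]
              · simp only [checkLoopA, loop1, if_neg e1, if_neg e2, if_neg e3, if_neg e4,
                           if_neg e5, if_neg e6]
                rw [if_neg (show ¬(b1 < 0 ∨ b2 < 0 ∨ b3 < 0) by omega), ih b1 b2 b3 h1 h2 h3]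

-- the positional characterization of loop1 with credit k
theorem posLemma (op cl : Char) (hne : op ≠ cl) : ∀ (l : List Char) (i : Int) (k : Nat),
    loop1 op cl l (k : Int) =
      (decide ((pos cl i l).length ≤ k + (pos op i l).length) &&
       ((pos op i l).zip ((pos cl i l).drop k)).all (fun p => decide (p.1 < p.2))) := by
  intro l
  induction l with
  | nil => intro i k; simp [loop1, pos]
  | cons c t ih =>
    intro i k
    by_cases hop : c = op
    · have hcl : ¬ c = cl := by rw [hop]; exact hne
      simp only [loop1, pos, if_pos hop, if_neg hcl]
      have hcast : (k : Int) + 1 = ((k + 1 : Nat) : Int) := by push_cast; ring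
      rw [hcast, ih (i + 1) (k + 1)]
      by_cases hk : k < (pos cl (i + 1) t).length
      · rw [List.drop_eq_getElem_cons hk]
        have hik : i < (pos cl (i + 1) t)[k] := by
          have := pos_ge cl t (i + 1) _ (List.getElem_mem hk); omega
        simp only [List.zip_cons_cons, List.all_cons, hik, decide_true, Bool.true_and]
        congr 1
        simp only [decide_eq_decide, List.length_cons]
        omega
      · have hd1 : (pos cl (i + 1) t).drop k = [] := List.drop_eq_nil_of_le (by omega)
        have hd2 : (pos cl (i + 1) t).drop (k + 1) = [] := List.drop_eq_nil_of_le (by omega)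
        rw [hd1, hd2]
        simp only [List.zip_nil_right, List.all_nil, Bool.and_true]
        simp only [decide_eq_decide, List.length_cons]
        omega
    · by_cases hcl : c = cl
      · simp only [loop1, pos, if_neg hop, if_pos hcl]
        cases k with
        | zero =>
          rw [if_pos (show ((0 : Nat) : Int) - 1 < 0 by simp)]
          cases hOc : pos op (i + 1) t with
          | nil =>
            have hlen : ¬ ((i :: pos cl (i + 1) t).length ≤ 0 + ([] : List Int).length) := by
              simp
            simp [hlen]
          | cons x O2 =>
            have hx : ¬ (x < i) := by
              have := pos_ge op t (i + 1) x (by rw [hOc]; exact List.mem_cons_self); omega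
            simp [hx]
        | succ k2 =>
          have hnn : ¬ ((k2 + 1 : Nat) : Int) - 1 < 0 := by push_cast; omega
          have hc2 : ((k2 + 1 : Nat) : Int) - 1 = (k2 : Int) := by push_cast; ring
          rw [if_neg hnn, hc2, ih (i + 1) k2]
          have hdrop : (i :: pos cl (i + 1) t).drop (k2 + 1) = (pos cl (i + 1) t).drop k2 := by
            simp
          rw [hdrop]
          congr 1
          simp only [decide_eq_decide, List.length_cons]
          omega
      · simp only [loop1, pos, if_neg hop, if_neg hcl]
        exact ih (i + 1) k

-- B's per-type test equals "counts equal AND the single-type scan succeeds"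
theorem perType (op cl : Char) (hne : op ≠ cl) (l : List Char) :
    (decide ((pos op 0 l).length = (pos cl 0 l).length) &&
      !(((pos op 0 l).zip (pos cl 0 l)).any (fun p => decide (p.1 > p.2))))
    = (decide (l.count op = l.count cl) && loop1 op cl l 0) := by
  have hp := posLemma op cl hne l 0 0
  simp only [Nat.cast_zero, List.drop_zero, Nat.zero_add] at hp
  rw [hp, pos_length, pos_length]
  by_cases h : l.count op = l.count cl
  · simp only [h, le_refl, decide_true, Bool.true_and]
    rw [Bool.eq_iff_iff]
    simp only [Bool.not_eq_true', List.any_eq_false, List.all_eq_true, decide_eq_true_eq]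
    constructor
    · intro hall p hmem
      obtain ⟨hm1, hm2⟩ := List.of_mem_zip hmem
      have hne2 : p.1 ≠ p.2 := fun he => pos_disjoint op cl hne l 0 p.1 hm1 (he ▸ hm2)
      have := hall p hmem
      omega
    · intro hall p hmem
      obtain ⟨hm1, hm2⟩ := List.of_mem_zip hmem
      have := hall p hmem
      omega
  · simp [h]

-- ===== VERDICT (by name: the statement is the Claim_ definition above) =====
theorem check_braces_spec : Claim_equal_check_braces := by
  intro s _
  unfold Spec_check_braces check_braces check_braces_alt bracePairs
  have c1 : PySem.Str.count s "(" = s.toList.count '(' := by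
    have h : ("(" : String).toList = ['('] := rfl
    simp [h, count_singleton]
  have c2 : PySem.Str.count s ")" = s.toList.count ')' := by
    have h : (")" : String).toList = [')'] := rfl
    simp [h, count_singleton]
  have c3 : PySem.Str.count s "[" = s.toList.count '[' := by
    have h : ("[" : String).toList = ['['] := rfl
    simp [h, count_singleton]
  have c4 : PySem.Str.count s "]" = s.toList.count ']' := by
    have h : ("]" : String).toList = [']'] := rfl
    simp [h, count_singleton]
  have c5 : PySem.Str.count s "{" = s.toList.count '{' := by
    have h : ("{" : String).toList = ['{'] := rfl
    simp [h, count_singleton]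
  have c6 : PySem.Str.count s "}" = s.toList.count '}' := by
    have h : ("}" : String).toList = ['}'] := rfl
    simp [h, count_singleton]
  rw [c1, c2, c3, c4, c5, c6]
  simp only [List.all_cons, List.all_nil, enumFilter]
  rw [perType '(' ')' (by decide) s.toList, perType '[' ']' (by decide) s.toList,
      perType '{' '}' (by decide) s.toList]
  rw [splitA s.toList 0 0 0 le_rfl le_rfl le_rfl]
  by_cases g1 : s.toList.count '(' = s.toList.count ')' <;>
    by_cases g2 : s.toList.count '[' = s.toList.count ']' <;>
      by_cases g3 : s.toList.count '{' = s.toList.count '}' <;>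
        · simp only [g1, g2, g3]
          cases loop1 '[' ']' s.toList 0 <;> cases loop1 '(' ')' s.toList 0 <;>
            cases loop1 '{' '}' s.toList 0 <;> simp [g1, g2, g3]
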